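-- pv_equiv track=rewrite | github.com/DutchSkiddie/script.preloader | script.preloader/resources/lib/sort.py | sortAddons
-- ===== SOURCE A (Python) =====
-- def sortAddons(list):
--     order = ["SKIN:", "REPO:", "PLUGIN:", "SERVICE:", "SCRIPT: "]
--     newlist = []
--     skinslist = []
--     repolist = []
--     pluginlist = []
--     servicelist = []
--     scriptlist = []
--
--     for listitem in list:
--         if order[0] in listitem:
--             skinslist.append(listitem)
--         if order[1] in listitem:
--             repolist.append(listitem)
--         if order[2] in listitem:
--             pluginlist.append(listitem)
--         if order[3] in listitem:
--             servicelist.append(listitem)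
--         if order[4] in listitem:
--             scriptlist.append(listitem)
--
--     newlist.append(skinslist)
--     newlist.append(repolist)
--     newlist.append(pluginlist)
--     newlist.append(servicelist)
--     newlist.append(scriptlist)
--
--     return newlist
-- ===== SOURCE B (Python) =====
-- def sortAddons(list):
--     order = ["SKIN:", "REPO:", "PLUGIN:", "SERVICE:", "SCRIPT: "]
--     tagged = [(i, x) for x in list for i, p in enumerate(order) if p in x]
--     tagged.sort(key=lambda t: t[0])  # stable: keeps input order within each category
--     buckets = [[] for _ in order]
--     for i, x in tagged:
--         buckets[i].append(x)
--     return buckets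
-- ===== Notes on version B (the rewrite author's own statement) =====
-- stated objective: alternative
-- what changed: Replaces A's single pass with five named accumulator lists by a sort-then-group algorithm: tag every matching item with its category index, stable-sort the tagged pairs by index, then distribute them into buckets in one final pass.
import Mathlib
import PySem

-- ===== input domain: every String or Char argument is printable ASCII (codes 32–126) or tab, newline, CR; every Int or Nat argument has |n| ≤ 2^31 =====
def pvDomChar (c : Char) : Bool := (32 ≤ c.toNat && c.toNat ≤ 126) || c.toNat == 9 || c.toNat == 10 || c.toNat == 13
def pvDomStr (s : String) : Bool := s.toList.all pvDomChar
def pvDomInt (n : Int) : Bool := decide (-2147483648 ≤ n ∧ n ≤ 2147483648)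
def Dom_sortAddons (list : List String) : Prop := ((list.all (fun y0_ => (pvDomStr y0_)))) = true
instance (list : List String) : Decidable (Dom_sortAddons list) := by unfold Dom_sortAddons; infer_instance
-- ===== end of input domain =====

-- B replaces A's single pass with five named accumulators by a sort-then-group
-- algorithm: tag each matching item with its category index, stable-sort the
-- tagged pairs by index, then distribute them into buckets in one final pass
-- (objective: alternative — same cost, a genuinely different strategy).


-- ===== PORT A =====
-- A's loop state: the five accumulator lists, each conditionally appended to.
def sortAddonsLoop (items : List String)
    (sk re pl se sc : List String) : List (List String) :=
  match items with
  | [] => [sk, re, pl, se, sc]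
  | x :: rest =>
      sortAddonsLoop rest
        (if PySem.Str.isIn "SKIN:" x then sk ++ [x] else sk)
        (if PySem.Str.isIn "REPO:" x then re ++ [x] else re)
        (if PySem.Str.isIn "PLUGIN:" x then pl ++ [x] else pl)
        (if PySem.Str.isIn "SERVICE:" x then se ++ [x] else se)
        (if PySem.Str.isIn "SCRIPT: " x then sc ++ [x] else sc)

def sortAddons (list : List String) : List (List String) :=
  sortAddonsLoop list [] [] [] [] []

-- ===== PORT B =====
-- the five category strings of Source B
def pvOrder : List String := ["SKIN:", "REPO:", "PLUGIN:", "SERVICE:", "SCRIPT: "]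

-- buckets[i].append(x); i is a non-negative enumerate index < 5 in Source B, so
-- .toNat set/getD is exact here.
def pvAppendAt (b : List (List String)) (i : Int) (x : String) : List (List String) :=
  b.set i.toNat ((b.getD i.toNat []) ++ [x])

def sortAddons_alt (list : List String) : List (List String) :=
  -- [(i, x) for x in list for i, p in enumerate(order) if p in x]
  let tagged := list.flatMap (fun x =>
    (PySem.List.enumerate pvOrder).filterMap (fun ip =>
      if PySem.Str.isIn ip.2 x then some (ip.1, x) else none))
  -- tagged.sort(key=lambda t: t[0]) — Python's sort is stable
  let sortedTagged := PySem.List.sorted tagged (fun t => t.1) false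
  -- buckets = [[] for _ in order]; for i, x in tagged: buckets[i].append(x)
  sortedTagged.foldl (fun b p => pvAppendAt b p.1 p.2) [[], [], [], [], []]

-- ===== PRECONDITION & SPEC =====
def Spec_sortAddons (list : List String) (out : List (List String)) : Prop := out = sortAddons_alt list
instance (list : List String) (out : List (List String)) : Decidable (Spec_sortAddons list out) := by unfold Spec_sortAddons; infer_instance

-- ===== CLAIM (what is proved, stated in full; the proofs are below) =====
def Claim_equal_sortAddons : Prop := ∀ (list : List String), Dom_sortAddons list → Spec_sortAddons list (sortAddons list)

-- ===== LEMMAS AND PROOFS =====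

-- A's loop computes the five filters, appended to the accumulators.
theorem sortAddonsLoop_eq (items : List String) :
    ∀ (sk re pl se sc : List String),
    sortAddonsLoop items sk re pl se sc =
      [sk ++ items.filter (fun x => PySem.Str.isIn "SKIN:" x),
       re ++ items.filter (fun x => PySem.Str.isIn "REPO:" x),
       pl ++ items.filter (fun x => PySem.Str.isIn "PLUGIN:" x),
       se ++ items.filter (fun x => PySem.Str.isIn "SERVICE:" x),
       sc ++ items.filter (fun x => PySem.Str.isIn "SCRIPT: " x)] := by
  induction items with
  | nil => intro sk re pl se sc; simp [sortAddonsLoop]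
  | cons x rest ih =>
      intro sk re pl se sc
      simp only [sortAddonsLoop, ih, List.filter_cons]
      split_ifs <;> simp

-- the per-item tag list of B, in closed form
theorem tags_eq (x : String) :
    (PySem.List.enumerate pvOrder).filterMap (fun ip =>
        if PySem.Str.isIn ip.2 x then some (ip.1, x) else none) =
      (if PySem.Str.isIn "SKIN:" x then [((0 : Int), x)] else []) ++
      (if PySem.Str.isIn "REPO:" x then [((1 : Int), x)] else []) ++
      (if PySem.Str.isIn "PLUGIN:" x then [((2 : Int), x)] else []) ++
      (if PySem.Str.isIn "SERVICE:" x then [((3 : Int), x)] else []) ++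
      (if PySem.Str.isIn "SCRIPT: " x then [((4 : Int), x)] else []) := by
  simp only [pvOrder, PySem.List.enumerate_cons, PySem.List.enumerate_nil,
    List.filterMap_cons, List.filterMap_nil]
  split_ifs <;> norm_num

-- skip a prefix whose elements x is not inserted before
theorem insertBy_append_of_not_before {α : Type} (before : α → α → Bool) (x : α)
    (ys zs : List α) (h : ∀ y ∈ ys, before x y = false) :
    PySem.List.insertBy before x (ys ++ zs) = ys ++ PySem.List.insertBy before x zs := by
  induction ys with
  | nil => simp
  | cons y t ih =>
      have hy : before x y = false := h y (by simp)
      simp [PySem.List.insertBy, hy, ih (fun z hz => h z (by simp [hz]))]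

-- drop in front when x goes before every element
theorem insertBy_eq_cons_of_all_before {α : Type} (before : α → α → Bool) (x : α)
    (zs : List α) (h : ∀ z ∈ zs, before x z = true) :
    PySem.List.insertBy before x zs = x :: zs := by
  cases zs with
  | nil => simp [PySem.List.insertBy]
  | cons z t => simp [PySem.List.insertBy, h z (by simp)]

-- tags are grouped as five blocks of constant first component
def Grouped (g0 g1 g2 g3 g4 : List (Int × String)) : Prop :=
  (∀ p ∈ g0, p.1 = 0) ∧ (∀ p ∈ g1, p.1 = 1) ∧ (∀ p ∈ g2, p.1 = 2) ∧
  (∀ p ∈ g3, p.1 = 3) ∧ (∀ p ∈ g4, p.1 = 4)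

-- inserting a tagged pair into a grouped list lands at the end of its group
theorem insertBy_grouped (p : Int × String) (g0 g1 g2 g3 g4 : List (Int × String))
    (hg : Grouped g0 g1 g2 g3 g4)
    (hp : p.1 = 0 ∨ p.1 = 1 ∨ p.1 = 2 ∨ p.1 = 3 ∨ p.1 = 4) :
    PySem.List.insertBy (fun a b => decide (a.1 < b.1)) p (g0 ++ g1 ++ g2 ++ g3 ++ g4) =
      (if p.1 = 0 then g0 ++ [p] else g0) ++ (if p.1 = 1 then g1 ++ [p] else g1) ++
      (if p.1 = 2 then g2 ++ [p] else g2) ++ (if p.1 = 3 then g3 ++ [p] else g3) ++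
      (if p.1 = 4 then g4 ++ [p] else g4) := by
  obtain ⟨h0, h1, h2, h3, h4⟩ := hg
  rcases hp with hp | hp | hp | hp | hp
  · rw [show g0 ++ g1 ++ g2 ++ g3 ++ g4 = (g0) ++ (g1 ++ g2 ++ g3 ++ g4) by simp,
      insertBy_append_of_not_before _ p (g0) _ (by
      intro y hy
      have := h0 y hy
      simp only [decide_eq_false_iff_not, not_lt]; omega
      ),
      insertBy_eq_cons_of_all_before _ p (g1 ++ g2 ++ g3 ++ g4) (by
      intro z hz
      simp only [List.append_assoc, List.mem_append] at hz
      rcases hz with hz | hz | hz | hz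
      · have := h1 z hz
        simp only [decide_eq_true_eq]; omega
      · have := h2 z hz
        simp only [decide_eq_true_eq]; omega
      · have := h3 z hz
        simp only [decide_eq_true_eq]; omega
      · have := h4 z hz
        simp only [decide_eq_true_eq]; omega
      )]
    simp [hp]
  · rw [show g0 ++ g1 ++ g2 ++ g3 ++ g4 = (g0 ++ g1) ++ (g2 ++ g3 ++ g4) by simp,
      insertBy_append_of_not_before _ p (g0 ++ g1) _ (by
      intro y hy
      simp only [List.mem_append] at hy
      rcases hy with hy | hy
      · have := h0 y hy
        simp only [decide_eq_false_iff_not, not_lt]; omega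
      · have := h1 y hy
        simp only [decide_eq_false_iff_not, not_lt]; omega
      ),
      insertBy_eq_cons_of_all_before _ p (g2 ++ g3 ++ g4) (by
      intro z hz
      simp only [List.append_assoc, List.mem_append] at hz
      rcases hz with hz | hz | hz
      · have := h2 z hz
        simp only [decide_eq_true_eq]; omega
      · have := h3 z hz
        simp only [decide_eq_true_eq]; omega
      · have := h4 z hz
        simp only [decide_eq_true_eq]; omega
      )]
    simp [hp]
  · rw [show g0 ++ g1 ++ g2 ++ g3 ++ g4 = (g0 ++ g1 ++ g2) ++ (g3 ++ g4) by simp,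
      insertBy_append_of_not_before _ p (g0 ++ g1 ++ g2) _ (by
      intro y hy
      simp only [List.append_assoc, List.mem_append] at hy
      rcases hy with hy | hy | hy
      · have := h0 y hy
        simp only [decide_eq_false_iff_not, not_lt]; omega
      · have := h1 y hy
        simp only [decide_eq_false_iff_not, not_lt]; omega
      · have := h2 y hy
        simp only [decide_eq_false_iff_not, not_lt]; omega
      ),
      insertBy_eq_cons_of_all_before _ p (g3 ++ g4) (by
      intro z hz
      simp only [List.mem_append] at hz
      rcases hz with hz | hz
      · have := h3 z hz
        simp only [decide_eq_true_eq]; omega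
      · have := h4 z hz
        simp only [decide_eq_true_eq]; omega
      )]
    simp [hp]
  · rw [show g0 ++ g1 ++ g2 ++ g3 ++ g4 = (g0 ++ g1 ++ g2 ++ g3) ++ (g4) by simp,
      insertBy_append_of_not_before _ p (g0 ++ g1 ++ g2 ++ g3) _ (by
      intro y hy
      simp only [List.append_assoc, List.mem_append] at hy
      rcases hy with hy | hy | hy | hy
      · have := h0 y hy
        simp only [decide_eq_false_iff_not, not_lt]; omega
      · have := h1 y hy
        simp only [decide_eq_false_iff_not, not_lt]; omega
      · have := h2 y hy
        simp only [decide_eq_false_iff_not, not_lt]; omega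
      · have := h3 y hy
        simp only [decide_eq_false_iff_not, not_lt]; omega
      ),
      insertBy_eq_cons_of_all_before _ p (g4) (by
      intro z hz
      have := h4 z hz
      simp only [decide_eq_true_eq]; omega
      )]
    simp [hp]
  · rw [show g0 ++ g1 ++ g2 ++ g3 ++ g4 = (g0 ++ g1 ++ g2 ++ g3 ++ g4) ++ (([] : List (Int × String))) by simp,
      insertBy_append_of_not_before _ p (g0 ++ g1 ++ g2 ++ g3 ++ g4) _ (by
      intro y hy
      simp only [List.append_assoc, List.mem_append] at hy
      rcases hy with hy | hy | hy | hy | hy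
      · have := h0 y hy
        simp only [decide_eq_false_iff_not, not_lt]; omega
      · have := h1 y hy
        simp only [decide_eq_false_iff_not, not_lt]; omega
      · have := h2 y hy
        simp only [decide_eq_false_iff_not, not_lt]; omega
      · have := h3 y hy
        simp only [decide_eq_false_iff_not, not_lt]; omega
      · have := h4 y hy
        simp only [decide_eq_false_iff_not, not_lt]; omega
      ),
      insertBy_eq_cons_of_all_before _ p (([] : List (Int × String))) (by
      intro z hz
      simp at hz
      )]
    simp [hp]

-- appending the new pair to its group keeps the group's constant tag
theorem grouped_step (k : Int) (g : List (Int × String)) (p : Int × String)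
    (hg : ∀ q ∈ g, q.1 = k) : ∀ q ∈ (if p.1 = k then g ++ [p] else g), q.1 = k := by
  intro q hq
  split_ifs at hq with h
  · rcases List.mem_append.mp hq with hq | hq
    · exact hg q hq
    · simp only [List.mem_singleton] at hq; rw [hq]; exact h
  · exact hg q hq

-- the stable insertion-sort fold keeps the five groups, each receiving its
-- matching tags in input order
theorem foldl_insertBy_grouped (l : List (Int × String)) :
    ∀ g0 g1 g2 g3 g4, Grouped g0 g1 g2 g3 g4 →
    (∀ p ∈ l, p.1 = 0 ∨ p.1 = 1 ∨ p.1 = 2 ∨ p.1 = 3 ∨ p.1 = 4) →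
    l.foldl (fun acc x => PySem.List.insertBy (fun a b => decide (a.1 < b.1)) x acc)
        (g0 ++ g1 ++ g2 ++ g3 ++ g4) =
      (g0 ++ l.filter (fun p => p.1 == 0)) ++ (g1 ++ l.filter (fun p => p.1 == 1)) ++
      (g2 ++ l.filter (fun p => p.1 == 2)) ++ (g3 ++ l.filter (fun p => p.1 == 3)) ++
      (g4 ++ l.filter (fun p => p.1 == 4)) := by
  induction l with
  | nil => intro g0 g1 g2 g3 g4 _ _; simp
  | cons p t ih =>
      intro g0 g1 g2 g3 g4 hg hl
      obtain ⟨h0, h1, h2, h3, h4⟩ := hg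
      have hp := hl p (by simp)
      rw [List.foldl_cons, insertBy_grouped p g0 g1 g2 g3 g4 ⟨h0, h1, h2, h3, h4⟩ hp,
        ih _ _ _ _ _
          ⟨grouped_step 0 g0 p h0, grouped_step 1 g1 p h1, grouped_step 2 g2 p h2,
           grouped_step 3 g3 p h3, grouped_step 4 g4 p h4⟩
          (fun q hq => hl q (by simp [hq]))]
      simp only [List.filter_cons]
      rcases hp with hp | hp | hp | hp | hp <;> simp [hp]

-- distributing one constant-tag block into the buckets
theorem foldl_appendAt_const (i : Int) (h0i : 0 ≤ i) (hi : i < 5) (l : List String) :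
    ∀ b0 b1 b2 b3 b4 : List String,
    (l.map (fun x => ((i : Int), x))).foldl (fun b p => pvAppendAt b p.1 p.2)
        [b0, b1, b2, b3, b4] =
      [if i = 0 then b0 ++ l else b0, if i = 1 then b1 ++ l else b1,
       if i = 2 then b2 ++ l else b2, if i = 3 then b3 ++ l else b3,
       if i = 4 then b4 ++ l else b4] := by
  induction l with
  | nil => intro b0 b1 b2 b3 b4; split_ifs <;> simp
  | cons x t ih =>
      intro b0 b1 b2 b3 b4
      interval_cases i
      · simp only [List.map_cons, List.foldl_cons]
        rw [show pvAppendAt [b0, b1, b2, b3, b4] (0 : Int) x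
              = [b0 ++ [x], b1, b2, b3, b4] from by simp [pvAppendAt], ih]
        simp
      · simp only [List.map_cons, List.foldl_cons]
        rw [show pvAppendAt [b0, b1, b2, b3, b4] (1 : Int) x
              = [b0, b1 ++ [x], b2, b3, b4] from by simp [pvAppendAt], ih]
        simp
      · simp only [List.map_cons, List.foldl_cons]
        rw [show pvAppendAt [b0, b1, b2, b3, b4] (2 : Int) x
              = [b0, b1, b2 ++ [x], b3, b4] from by simp [pvAppendAt], ih]
        simp
      · simp only [List.map_cons, List.foldl_cons]
        rw [show pvAppendAt [b0, b1, b2, b3, b4] (3 : Int) x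
              = [b0, b1, b2, b3 ++ [x], b4] from by simp [pvAppendAt], ih]
        simp
      · simp only [List.map_cons, List.foldl_cons]
        rw [show pvAppendAt [b0, b1, b2, b3, b4] (4 : Int) x
              = [b0, b1, b2, b3, b4 ++ [x]] from by simp [pvAppendAt], ih]
        simp

-- a filtered flatMap of singleton tag lists is the filtered input, mapped
theorem flatMap_if_singleton (i : Int) (c : String → Bool) (l : List String) :
    l.flatMap (fun x => if c x then [(i, x)] else []) =
      (l.filter c).map (fun x => (i, x)) := by
  induction l with
  | nil => rfl
  | cons x t ih => by_cases h : c x <;> simp [h, ih]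

-- ===== VERDICT (by name: the statement is the Claim_ definition above) =====
theorem sortAddons_spec : Claim_equal_sortAddons := by
  intro list _
  unfold Spec_sortAddons sortAddons sortAddons_alt
  rw [sortAddonsLoop_eq]
  simp only [tags_eq]
  set c0 : String → Bool := fun x => PySem.Str.isIn "SKIN:" x with hc0
  set c1 : String → Bool := fun x => PySem.Str.isIn "REPO:" x with hc1
  set c2 : String → Bool := fun x => PySem.Str.isIn "PLUGIN:" x with hc2
  set c3 : String → Bool := fun x => PySem.Str.isIn "SERVICE:" x with hc3
  set c4 : String → Bool := fun x => PySem.Str.isIn "SCRIPT: " x with hc4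
  set tagged : List (Int × String) := list.flatMap (fun x =>
      (if c0 x then [((0 : Int), x)] else []) ++ (if c1 x then [((1 : Int), x)] else []) ++
      (if c2 x then [((2 : Int), x)] else []) ++ (if c3 x then [((3 : Int), x)] else []) ++
      (if c4 x then [((4 : Int), x)] else [])) with htagged
  have htags : ∀ p ∈ tagged, p.1 = 0 ∨ p.1 = 1 ∨ p.1 = 2 ∨ p.1 = 3 ∨ p.1 = 4 := by
    intro p hp
    rw [htagged, List.mem_flatMap] at hp
    obtain ⟨x, _, hx⟩ := hp
    simp only [List.mem_append] at hx
    rcases hx with ((((hx | hx) | hx) | hx) | hx) <;> split_ifs at hx <;>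
      simp_all
  have hfilter : ∀ (i : Int) (ci : String → Bool),
      (∀ x, ((if c0 x then [((0:Int),x)] else []) ++ (if c1 x then [((1:Int),x)] else []) ++
        (if c2 x then [((2:Int),x)] else []) ++ (if c3 x then [((3:Int),x)] else []) ++
        (if c4 x then [((4:Int),x)] else [])).filter (fun p => p.1 == i) =
          (if ci x then [(i, x)] else [])) →
      tagged.filter (fun p => p.1 == i) = (list.filter ci).map (fun x => (i, x)) := by
    intro i ci hstep
    rw [htagged, List.filter_flatMap]
    have : (fun x => (((if c0 x then [((0:Int),x)] else []) ++ (if c1 x then [((1:Int),x)] else []) ++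
        (if c2 x then [((2:Int),x)] else []) ++ (if c3 x then [((3:Int),x)] else []) ++
        (if c4 x then [((4:Int),x)] else [])).filter (fun p => p.1 == i))) =
        (fun x => if ci x then [(i, x)] else []) := funext hstep
    rw [this, flatMap_if_singleton]
  have hf0 := hfilter 0 c0 (by intro x; split_ifs <;> simp)
  have hf1 := hfilter 1 c1 (by intro x; split_ifs <;> simp)
  have hf2 := hfilter 2 c2 (by intro x; split_ifs <;> simp)
  have hf3 := hfilter 3 c3 (by intro x; split_ifs <;> simp)
  have hf4 := hfilter 4 c4 (by intro x; split_ifs <;> simp)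
  rw [PySem.List.sorted_eq_foldl_insertBy]
  have hsort := foldl_insertBy_grouped tagged [] [] [] [] []
    ⟨by simp, by simp, by simp, by simp, by simp⟩ htags
  simp only [List.nil_append, List.append_nil] at hsort
  rw [show (fun acc x => PySem.List.insertBy
        (fun a b => decide ((fun (t : Int × String) => t.1) a < (fun (t : Int × String) => t.1) b)) x acc) =
      (fun acc x => PySem.List.insertBy (fun a b : Int × String => decide (a.1 < b.1)) x acc) by rfl]
  rw [show ([] : List (Int × String)) = [] ++ [] ++ [] ++ [] ++ [] by simp] at hsort ⊢
  rw [hsort, hf0, hf1, hf2, hf3, hf4]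
  rw [List.foldl_append, List.foldl_append, List.foldl_append, List.foldl_append]
  rw [foldl_appendAt_const 0 (by omega) (by omega), foldl_appendAt_const 1 (by omega) (by omega),
    foldl_appendAt_const 2 (by omega) (by omega), foldl_appendAt_const 3 (by omega) (by omega),
    foldl_appendAt_const 4 (by omega) (by omega)]
  simp
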